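-- pv_equiv track=rewrite | github.com/aqweteddy/KeyphraseGeneration | albert-tagging/light_train.py | convert_path_to_ids
-- ===== SOURCE A (Python) =====
-- def convert_path_to_ids(inp_ids, path):
--     ans = []
--     for idx in range(len(path)):
--         if path[idx] == 1:
--             word = []
--             while idx < len(path) and path[idx] != 0:
--                 word.append(inp_ids[idx])
--                 idx += 1
--             ans.append(word)
--     return ans
-- ===== SOURCE B (Python) =====
-- def convert_path_to_ids(inp_ids, path):
--     n = len(path)
--     # next-zero table: nz[i] = first index j >= i with j == n or path[j] == 0
--     nz = [n] * (n + 1)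
--     for i in range(n - 1, -1, -1):
--         nz[i] = i if path[i] == 0 else nz[i + 1]
--     return [inp_ids[i:nz[i]] for i in range(n) if path[i] == 1]
-- ===== Notes on version B (the rewrite author's own statement) =====
-- stated objective: alternative
-- what changed: Replaces A's inner forward re-scan from every tag-1 position by a single backward pass that precomputes each position's next-zero index, then emits one slice per tag-1 position in one comprehension.
import Mathlib
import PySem

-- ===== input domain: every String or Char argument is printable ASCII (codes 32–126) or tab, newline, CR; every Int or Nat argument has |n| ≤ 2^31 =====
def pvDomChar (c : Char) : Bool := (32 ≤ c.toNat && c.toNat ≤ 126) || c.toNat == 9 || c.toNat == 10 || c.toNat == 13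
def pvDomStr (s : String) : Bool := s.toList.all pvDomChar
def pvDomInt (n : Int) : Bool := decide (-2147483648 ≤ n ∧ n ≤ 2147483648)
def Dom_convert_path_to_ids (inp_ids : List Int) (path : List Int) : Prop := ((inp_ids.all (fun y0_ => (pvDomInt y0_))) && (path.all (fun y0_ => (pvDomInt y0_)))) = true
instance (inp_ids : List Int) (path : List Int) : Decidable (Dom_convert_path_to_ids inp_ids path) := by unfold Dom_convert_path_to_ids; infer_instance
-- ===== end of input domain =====

-- B replaces A's inner forward re-scan from every tag-1 position by one backward
-- next-zero pass plus one slice per tag-1 position (objective: alternative).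

-- ===== PORT A =====
-- inner while loop of A: collects inp_ids[idx] while idx < len(path) and path[idx] != 0
def wordA (inp_ids path : List Int) (idx : Nat) : List Int :=
  if _h : idx < path.length ∧ path.getD idx 0 ≠ 0 then
    inp_ids.getD idx 0 :: wordA inp_ids path (idx + 1)
  else []
termination_by path.length - idx
decreasing_by omega

def convert_path_to_ids (inp_ids : List Int) (path : List Int) : List (List Int) :=
  (List.range path.length).foldl
    (fun ans idx => if path.getD idx 0 = 1 then ans ++ [wordA inp_ids path idx] else ans) []

-- ===== PORT B =====
-- backward pass building the next-zero table: entry i is i if path[i]==0 else entry i+1; last entry is n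
def buildNz (path : List Int) (i : Nat) : List Nat :=
  match path with
  | [] => [i]
  | p :: rest =>
      let tail := buildNz rest (i + 1)
      (if p = 0 then i else tail.headD (i + 1)) :: tail

def convert_path_to_ids_alt (inp_ids : List Int) (path : List Int) : List (List Int) :=
  let n := path.length
  let nz := buildNz path 0
  (List.range n).filterMap (fun i =>
    if path.getD i 0 = 1 then
      some (PySem.List.slice inp_ids (some (i : Int)) (some ((nz.getD i n : Nat) : Int)))
    else none)

-- ===== PRECONDITION & SPEC =====
-- Pre_ excludes exactly the inputs on which A raises IndexError: those where some index j
-- reachable by A's inner scan (a nonzero run starting at a 1) is ≥ len(inp_ids).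
def Pre_convert_path_to_ids (inp_ids : List Int) (path : List Int) : Prop :=
  ∀ i ∈ List.range path.length, ∀ j ∈ List.range path.length,
    i ≤ j → path.getD i 0 = 1 →
    (∀ k ∈ List.range path.length, i ≤ k → k ≤ j → path.getD k 0 ≠ 0) →
    j < inp_ids.length
instance (inp_ids : List Int) (path : List Int) : Decidable (Pre_convert_path_to_ids inp_ids path) := by unfold Pre_convert_path_to_ids; infer_instance

def pvWitness_convert_path_to_ids : List Int × List Int := ([5, 6, 7], [1, 2, 0])

def Spec_convert_path_to_ids (inp_ids : List Int) (path : List Int) (out : List (List Int)) : Prop := out = convert_path_to_ids_alt inp_ids path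
instance (inp_ids : List Int) (path : List Int) (out : List (List Int)) : Decidable (Spec_convert_path_to_ids inp_ids path out) := by unfold Spec_convert_path_to_ids; infer_instance

-- ===== CLAIM (what is proved, stated in full; the proofs are below) =====
def Claim_equal_convert_path_to_ids : Prop := ∀ (inp_ids : List Int) (path : List Int), Dom_convert_path_to_ids inp_ids path → Pre_convert_path_to_ids inp_ids path → Spec_convert_path_to_ids inp_ids path (convert_path_to_ids inp_ids path)

-- ===== LEMMAS AND PROOFS =====

theorem buildNz_length (path : List Int) (i : Nat) : (buildNz path i).length = path.length + 1 := by
  induction path generalizing i with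
  | nil => simp [buildNz]
  | cons p rest ih => simp [buildNz, ih]

theorem buildNz_get_len (path : List Int) (i0 : Nat) (d : Nat) :
    (buildNz path i0).getD path.length d = i0 + path.length := by
  induction path generalizing i0 with
  | nil => simp [buildNz]
  | cons p rest ih =>
      simp only [buildNz, List.length_cons, List.getD_cons_succ]
      rw [ih]; omega

theorem buildNz_get (path : List Int) (i0 j : Nat) (d : Nat) (h : j < path.length) :
    (buildNz path i0).getD j d =
      if path.getD j 0 = 0 then i0 + j else (buildNz path i0).getD (j + 1) d := by
  induction path generalizing i0 j with
  | nil => simp at h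
  | cons p rest ih =>
      cases j with
      | zero =>
          simp only [buildNz, List.getD_cons_zero, List.getD_cons_succ]
          by_cases hp : p = 0
          · simp [hp]
          · have hlen : (buildNz rest (i0 + 1)).length = rest.length + 1 := buildNz_length _ _
            cases hb : buildNz rest (i0 + 1) with
            | nil => rw [hb] at hlen; simp at hlen
            | cons a t => simp [hp]
      | succ j' =>
          simp only [buildNz, List.getD_cons_succ]
          rw [ih (i0 + 1) j' (by simpa using Nat.lt_of_succ_lt_succ (by simpa using h))]
          by_cases hz : rest.getD j' 0 = 0
          · rw [if_pos hz, if_pos (by simpa using hz)]; omega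
          · rw [if_neg hz, if_neg (by simpa using hz)]

-- shorthand used only in the proofs
def nzA (path : List Int) (j : Nat) : Nat := (buildNz path 0).getD j path.length

theorem nzA_zero (path : List Int) (j : Nat) (h : j < path.length)
    (hz : path.getD j 0 = 0) : nzA path j = j := by
  unfold nzA; rw [buildNz_get path 0 j path.length h, if_pos hz]; omega

theorem nzA_nz (path : List Int) (j : Nat) (h : j < path.length)
    (hz : path.getD j 0 ≠ 0) : nzA path j = nzA path (j + 1) := by
  unfold nzA; rw [buildNz_get path 0 j path.length h, if_neg hz]

theorem nzA_len (path : List Int) : nzA path path.length = path.length := by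
  unfold nzA; rw [buildNz_get_len]; omega

theorem nzA_bounds (path : List Int) (j : Nat) (h : j ≤ path.length) :
    j ≤ nzA path j ∧ nzA path j ≤ path.length := by
  rcases Nat.lt_or_ge j path.length with hlt | hge
  · by_cases hz : path.getD j 0 = 0
    · rw [nzA_zero path j hlt hz]; omega
    · rw [nzA_nz path j hlt hz]
      have := nzA_bounds path (j + 1) (by omega)
      omega
  · have : j = path.length := by omega
    subst this; rw [nzA_len]; omega
termination_by path.length - j

theorem nzA_nonzero (path : List Int) (j k : Nat) (h : j ≤ path.length)
    (h1 : j ≤ k) (h2 : k < nzA path j) : path.getD k 0 ≠ 0 := by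
  rcases Nat.lt_or_ge j path.length with hlt | hge
  · by_cases hz : path.getD j 0 = 0
    · rw [nzA_zero path j hlt hz] at h2; omega
    · rcases Nat.eq_or_lt_of_le h1 with rfl | hjk
      · exact hz
      · rw [nzA_nz path j hlt hz] at h2
        exact nzA_nonzero path (j + 1) k (by omega) (by omega) h2
  · have : j = path.length := by omega
    subst this; rw [nzA_len] at h2; omega
termination_by path.length - j

theorem word_eq (inp_ids path : List Int) (j : Nat) (h : j ≤ path.length)
    (hk : ∀ k, j ≤ k → k < nzA path j → k < inp_ids.length) :
    wordA inp_ids path j = (inp_ids.drop j).take (nzA path j - j) := by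
  rcases Nat.lt_or_ge j path.length with hlt | hge
  · by_cases hz : path.getD j 0 = 0
    · rw [wordA, dif_neg (by tauto), nzA_zero path j hlt hz]
      simp
    · have hrec := nzA_nz path j hlt hz
      have hb := nzA_bounds path (j + 1) (by omega)
      have hjlt : j < nzA path j := by omega
      have hjid : j < inp_ids.length := hk j (le_refl j) hjlt
      rw [wordA, dif_pos ⟨hlt, hz⟩]
      rw [word_eq inp_ids path (j + 1) (by omega)
        (fun k h1 h2 => hk k (by omega) (by rw [hrec]; exact h2))]
      rw [List.drop_eq_getElem_cons hjid]
      have htk : nzA path j - j = (nzA path (j + 1) - (j + 1)) + 1 := by omega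
      rw [htk, List.take_succ_cons, List.getD_eq_getElem _ _ hjid]
  · have : j = path.length := by omega
    subst this
    rw [wordA]
    simp [nzA_len]
termination_by path.length - j

theorem foldl_if_append {α β : Type} (l : List α) (c : α → Bool) (f : α → β) (acc : List β) :
    l.foldl (fun a i => if c i then a ++ [f i] else a) acc
      = acc ++ l.filterMap (fun i => if c i then some (f i) else none) := by
  induction l generalizing acc with
  | nil => simp
  | cons x xs ih =>
      simp only [List.foldl_cons, List.filterMap_cons]
      by_cases hx : c x
      · simp [hx, ih]
      · simp [hx, ih]

-- ===== VERDICT (by name: the statement is the Claim_ definition above) =====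
theorem convert_path_to_ids_spec : Claim_equal_convert_path_to_ids := by
  intro inp_ids path _ hpre
  unfold Spec_convert_path_to_ids convert_path_to_ids convert_path_to_ids_alt
  have := foldl_if_append (List.range path.length)
    (fun idx => path.getD idx 0 = 1) (fun idx => wordA inp_ids path idx) []
  simp only [decide_eq_true_eq] at this
  rw [this]
  simp only [List.nil_append]
  apply List.filterMap_congr
  intro i hi
  have hin : i < path.length := List.mem_range.mp hi
  by_cases h1 : path.getD i 0 = 1
  · simp only [h1, if_pos]
    congr 1
    have hk : ∀ k, i ≤ k → k < nzA path i → k < inp_ids.length := by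
      intro k hik hklt
      have hbnd := nzA_bounds path i (by omega)
      have hkn : k < path.length := by omega
      exact hpre i (List.mem_range.mpr hin) k (List.mem_range.mpr hkn) hik h1
        (fun k' hk' h1' h2' => nzA_nonzero path i k' (by omega) h1' (by omega))
    rw [word_eq inp_ids path i (by omega) hk]
    rw [PySem.List.slice_natCast]
    rfl
  · rw [if_neg (by simpa using h1), if_neg (by simpa using h1)]
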